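-- pv_equiv track=rewrite | github.com/AugustynJ/steganography | TTL/listener.py | ttls_to_msg
-- ===== SOURCE A (Python) =====
-- USED_BITS = 4
--
-- def remove_padding(bits: str):
--     return bits[0:len(bits)-(len(bits)%USED_BITS)]
--
-- def ttls_to_bits(ttl_list: list):
--     res = ""
--     for ttl in ttl_list:
--         res += format(ttl%pow(2, USED_BITS), f'0{USED_BITS}b')
--     return res
--
-- def check_doublers(ttl_list: list):
--     for i in range (1, len(ttl_list), 2):
--         if ttl_list[i] != ttl_list[i-1]:
--             return ttl_list
--
--     new_list = ttl_list[::2]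
--     return new_list
--
-- def ttls_to_msg(ttl_list: list):
--     ttl_list = check_doublers(ttl_list)
--     bits = ttls_to_bits(ttl_list)
--     bits = remove_padding(bits)
--     res = ""
--     for i in range(0, len(bits), 8):
--         res += chr(int(bits[i:i+8], 2))
--     return res
-- ===== SOURCE B (Python) =====
-- def ttls_to_msg(ttl_list: list):
--     # doubler compression (kept from the protocol): if every odd element repeats
--     # its predecessor, keep only the even-indexed ones
--     if all(ttl_list[i] == ttl_list[i - 1] for i in range(1, len(ttl_list), 2)):
--         ttl_list = ttl_list[::2]
--     chars = []
--     n = len(ttl_list)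
--     for i in range(0, n, 2):
--         a = ttl_list[i] % 16
--         if i + 1 < n:
--             chars.append(chr(a * 16 + ttl_list[i + 1] % 16))
--         else:
--             chars.append(chr(a))
--     return ''.join(chars)
-- ===== Notes on version B (the rewrite author's own statement) =====
-- stated objective: simpler
-- what changed: Replaced the build-a-bit-string / strip-padding / regroup-into-8-bit-chunks pipeline with one arithmetic pass over TTL pairs emitting chr(a*16+b) (chr(a) for a trailing lone TTL).
import Mathlib
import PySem

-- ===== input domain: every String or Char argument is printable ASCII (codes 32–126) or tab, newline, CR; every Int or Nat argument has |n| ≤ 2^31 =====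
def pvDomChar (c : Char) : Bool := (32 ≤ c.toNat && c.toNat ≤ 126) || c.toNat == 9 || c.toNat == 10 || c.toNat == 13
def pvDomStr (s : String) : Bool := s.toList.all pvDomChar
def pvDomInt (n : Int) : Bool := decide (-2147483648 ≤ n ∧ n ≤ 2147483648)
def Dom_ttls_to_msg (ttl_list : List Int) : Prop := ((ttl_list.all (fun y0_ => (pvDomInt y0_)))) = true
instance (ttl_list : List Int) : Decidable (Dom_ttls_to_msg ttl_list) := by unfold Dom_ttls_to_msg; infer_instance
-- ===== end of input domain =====

-- B replaces A's bit-string build / padding strip / 8-bit regrouping with one arithmetic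
-- pass over TTL pairs (simpler, same O(n) cost); equivalence proved on all inputs.


-- ===== PORT A =====
-- remove_padding: bits[0 : len(bits) - (len(bits) % 4)]
def pvRemovePadding (bits : List Char) : List Char :=
  PySem.List.slice bits (some 0) (some ((bits.length : Int) - PySem.Int.mod (bits.length : Int) 4))

-- format(ttl % 16, '04b') = format(ttl % 16, 'b') zero-filled to width 4 (exact for 0 ≤ n)
def pvFormat4 (n : Int) : List Char := PySem.Chars.zfill (PySem.Int.toBinChars n) 4

-- ttls_to_bits: res = ""; for ttl in ttl_list: res += format(ttl % 16, '04b')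
def pvTtlsToBits (ttl_list : List Int) : List Char :=
  ttl_list.foldl (fun res ttl => res ++ pvFormat4 (PySem.Int.mod ttl 16)) []

-- check_doublers: the for-loop with early return (indices come from range(1, len, 2), always in range)
def pvCdLoop (l : List Int) : List Int → List Int
  | [] => (PySem.List.slice? l none none 2).getD []   -- l[::2]; step 2 ≠ 0, so slice? is `some`
  | i :: rest =>
      if PySem.List.pyGetD l i 0 ≠ PySem.List.pyGetD l (i - 1) 0 then l else pvCdLoop l rest

def pvCheckDoublers (l : List Int) : List Int :=
  pvCdLoop l (PySem.List.pyRange 1 (l.length : Int) 2)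

-- int(s, 2): hand port, exact for strings of '0'/'1' digits (the only strings A feeds it)
def pvParseBin (cs : List Char) : Int :=
  cs.foldl (fun a c => 2 * a + (if c = '1' then 1 else 0)) 0

def ttls_to_msg (ttl_list : List Int) : String :=
  let l := pvCheckDoublers ttl_list
  let bits := pvRemovePadding (pvTtlsToBits l)
  String.ofList ((PySem.List.pyRange 0 (bits.length : Int) 8).foldl
    (fun res i =>
      res ++ [Char.ofNat (pvParseBin (PySem.List.slice bits (some i) (some (i + 8)))).toNat])
    [])

-- ===== PORT B =====
def ttls_to_msg_alt (ttl_list : List Int) : String :=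
  let l := if (PySem.List.pyRange 1 (ttl_list.length : Int) 2).all
              (fun i => PySem.List.pyGetD ttl_list i 0 == PySem.List.pyGetD ttl_list (i - 1) 0)
           then (PySem.List.slice? ttl_list none none 2).getD []
           else ttl_list
  let n : Int := (l.length : Int)
  String.ofList ((PySem.List.pyRange 0 n 2).foldl
    (fun chars i =>
      let a := PySem.Int.mod (PySem.List.pyGetD l i 0) 16
      if i + 1 < n then
        chars ++ [Char.ofNat (a * 16 + PySem.Int.mod (PySem.List.pyGetD l (i + 1) 0) 16).toNat]
      else
        chars ++ [Char.ofNat a.toNat])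
    [])

-- ===== PRECONDITION & SPEC =====
def Spec_ttls_to_msg (ttl_list : List Int) (out : String) : Prop := out = ttls_to_msg_alt ttl_list
instance (ttl_list : List Int) (out : String) : Decidable (Spec_ttls_to_msg ttl_list out) := by unfold Spec_ttls_to_msg; infer_instance

-- ===== CLAIM (what is proved, stated in full; the proofs are below) =====
def Claim_equal_ttls_to_msg : Prop := ∀ (ttl_list : List Int), Dom_ttls_to_msg ttl_list → Spec_ttls_to_msg ttl_list (ttls_to_msg ttl_list)

-- ===== LEMMAS AND PROOFS =====

-- the common meaning of both message loops: one char per pair of 4-bit values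
def pvPairs : List Int → List Char
  | [] => []
  | [a] => [Char.ofNat (PySem.Int.mod a 16).toNat]
  | a :: b :: rest =>
      Char.ofNat (PySem.Int.mod a 16 * 16 + PySem.Int.mod b 16).toNat :: pvPairs rest

theorem pvCdLoop_eq (l : List Int) (r : List Int) :
    pvCdLoop l r =
      if r.all (fun i => PySem.List.pyGetD l i 0 == PySem.List.pyGetD l (i - 1) 0)
      then (PySem.List.slice? l none none 2).getD [] else l := by
  induction r with
  | nil => rfl
  | cons i rest ih =>
      rw [pvCdLoop, List.all_cons, ih]
      by_cases h : PySem.List.pyGetD l i 0 = PySem.List.pyGetD l (i - 1) 0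
      · rw [if_neg (not_not_intro h)]
        rw [show (PySem.List.pyGetD l i 0 == PySem.List.pyGetD l (i - 1) 0) = true from
          beq_iff_eq.mpr h, Bool.true_and]
      · rw [if_pos h]
        rw [show (PySem.List.pyGetD l i 0 == PySem.List.pyGetD l (i - 1) 0) = false from
          beq_eq_false_iff_ne.mpr h, Bool.false_and]
        rfl

theorem pvMod16_nonneg (t : Int) : 0 ≤ PySem.Int.mod t 16 :=
  PySem.Int.mod_nonneg t (by norm_num)

theorem pvMod16_lt (t : Int) : PySem.Int.mod t 16 < 16 :=
  PySem.Int.mod_lt t (by norm_num)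

theorem pvFormat4_len (r : Int) (h0 : 0 ≤ r) (h16 : r < 16) : (pvFormat4 r).length = 4 := by
  interval_cases r <;> decide

theorem pvParseBin_from (cs : List Char) :
    ∀ a : Int, cs.foldl (fun a c => 2 * a + (if c = '1' then 1 else 0)) a
      = a * 2 ^ cs.length + pvParseBin cs := by
  induction cs with
  | nil => intro a; simp [pvParseBin]
  | cons c cs ih =>
      intro a
      rw [List.foldl_cons, ih, List.length_cons]
      conv_rhs => rw [pvParseBin, List.foldl_cons, ih]
      ring

theorem pvParseBin_append (u v : List Char) :
    pvParseBin (u ++ v) = pvParseBin u * 2 ^ v.length + pvParseBin v := by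
  simp only [pvParseBin, List.foldl_append]
  rw [pvParseBin_from]
  rfl

theorem pvParseBin_format4 (r : Int) (h0 : 0 ≤ r) (h16 : r < 16) :
    pvParseBin (pvFormat4 r) = r := by
  interval_cases r <;> decide

-- bits of a list = flatMap of 4-bit blocks
theorem pvTtlsToBits_eq (l : List Int) :
    pvTtlsToBits l = l.flatMap (fun t => pvFormat4 (PySem.Int.mod t 16)) := by
  simpa [pvTtlsToBits] using
    PySem.List.foldl_append_eq_flatMap (fun t => pvFormat4 (PySem.Int.mod t 16)) l []

theorem pvBits_len (l : List Int) : (pvTtlsToBits l).length = 4 * l.length := by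
  rw [pvTtlsToBits_eq]
  induction l with
  | nil => rfl
  | cons t rest ih =>
      rw [List.flatMap_cons, List.length_append, ih,
        pvFormat4_len _ (pvMod16_nonneg t) (pvMod16_lt t), List.length_cons]
      ring

-- remove_padding is the identity on bit strings of length a multiple of 4
theorem pvRemovePadding_id (bits : List Char) (h : 4 ∣ (bits.length : Int)) :
    pvRemovePadding bits = bits := by
  unfold pvRemovePadding
  rw [(PySem.Int.mod_eq_zero_iff_dvd _ _).mpr h]
  simp

-- A's decode loop in closed form
theorem pvDecodeA_closed (bits : List Char) :
    ((PySem.List.pyRange 0 (bits.length : Int) 8).foldl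
      (fun res i =>
        res ++ [Char.ofNat (pvParseBin (PySem.List.slice bits (some i) (some (i + 8)))).toNat])
      [])
    = (List.range (if (0:Int) < (bits.length : Int)
          then (((bits.length : Int) + 7) / 8).toNat else 0)).map
        (fun k => Char.ofNat (pvParseBin ((bits.drop (8 * k)).take 8)).toNat) := by
  rw [PySem.List.pyRange_of_pos 0 (bits.length : Int) (by norm_num)]
  rw [List.foldl_map]
  rw [PySem.List.foldl_append_singleton_eq_map]
  rw [List.nil_append]
  have hK : (if (0:Int) < (bits.length : Int)
        then (((bits.length : Int) - 0 + 8 - 1) / 8).toNat else 0)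
      = (if (0:Int) < (bits.length : Int)
          then (((bits.length : Int) + 7) / 8).toNat else 0) := by
    split
    · congr 1; omega
    · rfl
  rw [hK]
  apply List.map_congr_left
  intro k _
  have h1 : (0 + 8 * (k : Int)) = ((8 * k : Nat) : Int) := by push_cast; ring
  have h2 : (((8 * k : Nat) : Int) + 8) = ((8 * k + 8 : Nat) : Int) := by push_cast; ring
  have h3 : 8 * k + 8 - 8 * k = 8 := by omega
  rw [h1, h2, PySem.List.slice_natCast, h3]

-- the chunked decode of the flat bit string is pvPairs
theorem pvDecodeA_pairs (l : List Int) :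
    (List.range (if (0:Int) < ((pvTtlsToBits l).length : Int)
        then ((((pvTtlsToBits l).length : Int) + 7) / 8).toNat else 0)).map
      (fun k => Char.ofNat (pvParseBin (((pvTtlsToBits l).drop (8 * k)).take 8)).toNat)
    = pvPairs l := by
  induction l using pvPairs.induct with
  | case1 => rfl
  | case2 a =>
      have hlen : (pvTtlsToBits [a]).length = 4 := by rw [pvBits_len]; rfl
      rw [hlen]
      norm_num
      have htake : (pvTtlsToBits [a]).take 8 = pvTtlsToBits [a] :=
        List.take_of_length_le (by omega)
      rw [htake]
      simp only [pvTtlsToBits_eq, List.flatMap_cons, List.flatMap_nil, List.append_nil, pvPairs]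
      rw [pvParseBin_format4 _ (pvMod16_nonneg a) (pvMod16_lt a)]
  | case3 a b rest ih =>
      have hsplit : pvTtlsToBits (a :: b :: rest)
          = (pvFormat4 (PySem.Int.mod a 16) ++ pvFormat4 (PySem.Int.mod b 16))
            ++ pvTtlsToBits rest := by
        rw [pvTtlsToBits_eq, pvTtlsToBits_eq]
        simp [List.flatMap_cons]
      have hpre : (pvFormat4 (PySem.Int.mod a 16) ++ pvFormat4 (PySem.Int.mod b 16)).length = 8 := by
        rw [List.length_append, pvFormat4_len _ (pvMod16_nonneg a) (pvMod16_lt a),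
          pvFormat4_len _ (pvMod16_nonneg b) (pvMod16_lt b)]
      have hlen : (pvTtlsToBits (a :: b :: rest)).length = 8 + (pvTtlsToBits rest).length := by
        rw [hsplit, List.length_append, hpre]
      have hrest4 : (pvTtlsToBits rest).length = 4 * rest.length := pvBits_len rest
      have hcount :
          (if (0:Int) < ((pvTtlsToBits (a :: b :: rest)).length : Int)
            then ((((pvTtlsToBits (a :: b :: rest)).length : Int) + 7) / 8).toNat else 0)
          = (if (0:Int) < ((pvTtlsToBits rest).length : Int)
              then ((((pvTtlsToBits rest).length : Int) + 7) / 8).toNat else 0) + 1 := by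
        rw [hlen]
        rcases Nat.eq_zero_or_pos (pvTtlsToBits rest).length with h | h
        · rw [h]; norm_num
        · rw [if_pos (by omega), if_pos (by omega)]
          omega
      rw [hcount, List.range_succ_eq_map, List.map_cons, List.map_map]
      rw [pvPairs, List.cons_eq_cons]
      constructor
      · -- head element: k = 0
        rw [hsplit]
        rw [Nat.mul_zero, List.drop_zero,
          List.take_append_of_le_length (by omega),
          List.take_of_length_le (by omega),
          pvParseBin_append,
          pvFormat4_len _ (pvMod16_nonneg b) (pvMod16_lt b),
          pvParseBin_format4 _ (pvMod16_nonneg a) (pvMod16_lt a),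
          pvParseBin_format4 _ (pvMod16_nonneg b) (pvMod16_lt b)]
        norm_num
      · -- tail: shift by one chunk
        rw [← ih]
        apply List.map_congr_left
        intro k _
        rw [Function.comp_apply]
        simp only [Nat.succ_eq_add_one]
        congr 2
        rw [hsplit]
        have h8 : 8 * (k + 1)
            = (pvFormat4 (PySem.Int.mod a 16) ++ pvFormat4 (PySem.Int.mod b 16)).length + 8 * k := by
          rw [hpre]; ring
        rw [h8, List.drop_length_add_append]

-- B's loop in closed form equals pvPairs
theorem pvDecodeB_closed (l : List Int) :
    ((PySem.List.pyRange 0 (l.length : Int) 2).foldl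
      (fun chars i =>
        let a := PySem.Int.mod (PySem.List.pyGetD l i 0) 16
        if i + 1 < (l.length : Int) then
          chars ++ [Char.ofNat (a * 16 + PySem.Int.mod (PySem.List.pyGetD l (i + 1) 0) 16).toNat]
        else
          chars ++ [Char.ofNat a.toNat])
      [])
    = (List.range (if (0:Int) < (l.length : Int)
          then (((l.length : Int) - 0 + 2 - 1) / 2).toNat else 0)).map
        (fun (k : Nat) =>
          if (0 : Int) + 2 * (k : Int) + 1 < (l.length : Int) then
            Char.ofNat (PySem.Int.mod (PySem.List.pyGetD l (0 + 2 * (k : Int)) 0) 16 * 16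
              + PySem.Int.mod (PySem.List.pyGetD l (0 + 2 * (k : Int) + 1) 0) 16).toNat
          else
            Char.ofNat (PySem.Int.mod (PySem.List.pyGetD l (0 + 2 * (k : Int)) 0) 16).toNat) := by
  have hfun : (fun (chars : List Char) (i : Int) =>
      let a := PySem.Int.mod (PySem.List.pyGetD l i 0) 16
      if i + 1 < (l.length : Int) then
        chars ++ [Char.ofNat (a * 16 + PySem.Int.mod (PySem.List.pyGetD l (i + 1) 0) 16).toNat]
      else
        chars ++ [Char.ofNat a.toNat])
    = (fun chars i => chars ++
        [if i + 1 < (l.length : Int) then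
          Char.ofNat (PySem.Int.mod (PySem.List.pyGetD l i 0) 16 * 16
            + PySem.Int.mod (PySem.List.pyGetD l (i + 1) 0) 16).toNat
         else Char.ofNat (PySem.Int.mod (PySem.List.pyGetD l i 0) 16).toNat]) := by
    funext chars i
    by_cases h : i + 1 < (l.length : Int) <;> simp [h]
  rw [hfun, PySem.List.pyRange_of_pos 0 (l.length : Int) (by norm_num), List.foldl_map,
    PySem.List.foldl_append_singleton_eq_map, List.nil_append]

theorem pvDecodeB_pairs (l : List Int) :
    (List.range (if (0:Int) < (l.length : Int)
        then (((l.length : Int) - 0 + 2 - 1) / 2).toNat else 0)).map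
      (fun (k : Nat) =>
        if (0 : Int) + 2 * (k : Int) + 1 < (l.length : Int) then
          Char.ofNat (PySem.Int.mod (PySem.List.pyGetD l (0 + 2 * (k : Int)) 0) 16 * 16
            + PySem.Int.mod (PySem.List.pyGetD l (0 + 2 * (k : Int) + 1) 0) 16).toNat
        else
          Char.ofNat (PySem.Int.mod (PySem.List.pyGetD l (0 + 2 * (k : Int)) 0) 16).toNat)
    = pvPairs l := by
  induction l using pvPairs.induct with
  | case1 => rfl
  | case2 a =>
      norm_num
      rw [show pvPairs [a] = [Char.ofNat (PySem.Int.mod a 16).toNat] from rfl,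
        PySem.Int.mod_eq_emod_of_pos (by norm_num : (0:Int) < 16)]
  | case3 a b rest ih =>
      have hcount :
          (if (0:Int) < ((a :: b :: rest).length : Int)
            then ((((a :: b :: rest).length : Int) - 0 + 2 - 1) / 2).toNat else 0)
          = (if (0:Int) < (rest.length : Int)
              then (((rest.length : Int) - 0 + 2 - 1) / 2).toNat else 0) + 1 := by
        rcases Nat.eq_zero_or_pos rest.length with h | h
        · simp only [List.length_cons, h]
          norm_num
        · simp only [List.length_cons]
          rw [if_pos (by omega), if_pos (by omega)]
          push_cast
          omega
      rw [hcount, List.range_succ_eq_map, List.map_cons, List.map_map]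
      rw [pvPairs, List.cons_eq_cons]
      have hget : ∀ (j : Nat), PySem.List.pyGetD (a :: b :: rest) ((j : Int) + 2) 0
          = PySem.List.pyGetD rest (j : Int) 0 := by
        intro j
        have : ((j : Int) + 2) = ((j + 2 : Nat) : Int) := by push_cast; ring
        rw [this, PySem.List.pyGetD_natCast, PySem.List.pyGetD_natCast]
        have : j + 2 = (j + 1) + 1 := by ring
        rw [this, List.getD_cons_succ, List.getD_cons_succ]
      constructor
      · -- head element: k = 0
        rw [if_pos (by simp only [List.length_cons]; push_cast; omega)]
        norm_num
        simp [PySem.List.pyGetD_ofNat']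
      · -- tail: shift by one pair
        rw [← ih]
        apply List.map_congr_left
        intro k _
        rw [Function.comp_apply]
        simp only [Nat.succ_eq_add_one]
        have e0 : (0 : Int) + 2 * ((k + 1 : Nat) : Int) = ((0 : Int) + 2 * (k : Int)) + 2 := by
          push_cast; ring
        have e1 : (0 : Int) + 2 * ((k + 1 : Nat) : Int) + 1 = ((0 : Int) + 2 * (k : Int) + 1) + 2 := by
          push_cast; ring
        have hcond : ((0 : Int) + 2 * ((k + 1 : Nat) : Int) + 1 < ((a :: b :: rest).length : Int))
            ↔ ((0 : Int) + 2 * (k : Int) + 1 < (rest.length : Int)) := by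
          simp only [List.length_cons]; push_cast; omega
        have g0 : PySem.List.pyGetD (a :: b :: rest) ((0 : Int) + 2 * ((k + 1 : Nat) : Int)) 0
            = PySem.List.pyGetD rest ((0 : Int) + 2 * (k : Int)) 0 := by
          have h2k : (0 : Int) + 2 * (k : Int) = ((2 * k : Nat) : Int) := by push_cast; ring
          rw [e0, h2k, hget]
        have g1 : PySem.List.pyGetD (a :: b :: rest) ((0 : Int) + 2 * ((k + 1 : Nat) : Int) + 1) 0
            = PySem.List.pyGetD rest ((0 : Int) + 2 * (k : Int) + 1) 0 := by
          have h2k : (0 : Int) + 2 * (k : Int) + 1 = ((2 * k + 1 : Nat) : Int) := by push_cast; ring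
          rw [e1, h2k, hget]
        by_cases h : (0 : Int) + 2 * (k : Int) + 1 < (rest.length : Int)
        · rw [if_pos (hcond.mpr h), if_pos h, g0, g1]
        · rw [if_neg (fun hc => h (hcond.mp hc)), if_neg h, g0]

theorem ttls_to_msg_eq (l : List Int) : ttls_to_msg l = ttls_to_msg_alt l := by
  simp only [ttls_to_msg, ttls_to_msg_alt]
  rw [pvCheckDoublers, pvCdLoop_eq]
  set l' := if (PySem.List.pyRange 1 (l.length : Int) 2).all
      (fun i => PySem.List.pyGetD l i 0 == PySem.List.pyGetD l (i - 1) 0)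
    then (PySem.List.slice? l none none 2).getD [] else l with hl'
  have hpad : pvRemovePadding (pvTtlsToBits l') = pvTtlsToBits l' := by
    apply pvRemovePadding_id
    rw [pvBits_len]; push_cast; exact ⟨(l'.length : Int), by ring⟩
  rw [hpad, pvDecodeA_closed, pvDecodeA_pairs, pvDecodeB_closed, pvDecodeB_pairs]

-- ===== VERDICT (by name: the statement is the Claim_ definition above) =====
theorem ttls_to_msg_spec : Claim_equal_ttls_to_msg := by
  intro l _
  unfold Spec_ttls_to_msg
  exact ttls_to_msg_eq l
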